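-- pv_equiv track=rewrite | github.com/SmaF1-dev/Algorithms_and_Data-Structures | lab3/task4/src/main.py | find_kol
-- ===== SOURCE A (Python) =====
-- def find_kol(s,k,lst_int, lst_us):
--     lst_us_copy = lst_us.copy()
--     lst_int_copy = lst_int.copy()
--
--     lst = []
--     for i in range(s):
--         lst.append((lst_int_copy[i][0], -1))
--         lst.append((lst_int_copy[i][1], -2))
--
--     for i in range(k):
--         lst.append((lst_us_copy[i], i))
--
--     lst = sorted(lst)
--     length = len(lst)
--     cnt = 0
--
--     for i in range(length):
--         if lst[i][1] == -1:
--             cnt += 1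
--         elif lst[i][1] == -2:
--             cnt -= 1
--         else:
--             lst_us_copy[lst[i][1]] = cnt
--     return lst_us_copy
-- ===== SOURCE B (Python) =====
-- from bisect import bisect_right
--
-- def find_kol(s, k, lst_int, lst_us):
--     # interval [a,b] is active at x iff a <= x and b > x (A's tie order: ends, then
--     # starts, then queries), so count = #(starts <= x) - #(ends <= x)
--     starts = sorted(lst_int[i][0] for i in range(s))
--     ends = sorted(lst_int[i][1] for i in range(s))
--     res = lst_us.copy()
--     for j in range(k):
--         x = lst_us[j]
--         res[j] = bisect_right(starts, x) - bisect_right(ends, x)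
--     return res
-- ===== Notes on version B (the rewrite author's own statement) =====
-- stated objective: alternative
-- what changed: Replaced A's merged event list (2s+k tagged tuples, one sort, one stateful sweep that writes counts into a copy of lst_us) by two independently sorted start/end arrays queried per point with bisect_right, using count(x) = #(starts <= x) - #(ends <= x).
import Mathlib
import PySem

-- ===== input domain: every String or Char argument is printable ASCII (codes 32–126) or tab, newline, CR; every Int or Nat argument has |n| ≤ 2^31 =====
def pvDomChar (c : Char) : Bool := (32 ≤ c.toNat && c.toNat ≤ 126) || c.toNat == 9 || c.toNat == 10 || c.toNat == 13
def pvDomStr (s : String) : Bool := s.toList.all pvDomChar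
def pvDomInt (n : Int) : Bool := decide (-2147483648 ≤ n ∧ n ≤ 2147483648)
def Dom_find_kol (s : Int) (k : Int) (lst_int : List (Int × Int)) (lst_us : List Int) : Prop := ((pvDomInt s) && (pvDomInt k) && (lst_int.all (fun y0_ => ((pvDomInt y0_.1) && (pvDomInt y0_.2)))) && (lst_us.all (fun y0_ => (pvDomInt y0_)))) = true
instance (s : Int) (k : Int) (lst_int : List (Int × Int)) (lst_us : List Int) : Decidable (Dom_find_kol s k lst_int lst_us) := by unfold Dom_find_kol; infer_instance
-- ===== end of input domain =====

-- B replaces A's merged event-sweep by two sorted start/end arrays queried with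
-- bisect_right per point (alternative decomposition, similar cost).


-- ===== PORT A =====
def find_kol (s : Int) (k : Int) (lst_int : List (Int × Int)) (lst_us : List Int) : List Int :=
  let lst1 : List (Int × Int) :=
    (PySem.List.pyRange 0 s 1).foldl (fun acc i =>
      acc ++ [((PySem.List.pyGetD lst_int i ((0:Int),(0:Int))).1, (-1 : Int)),
              ((PySem.List.pyGetD lst_int i ((0:Int),(0:Int))).2, (-2 : Int))]) []
  let lst2 : List (Int × Int) :=
    (PySem.List.pyRange 0 k 1).foldl (fun acc i =>
      acc ++ [(PySem.List.pyGetD lst_us i 0, i)]) lst1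
  -- Python's sorted(lst) on int pairs = lexicographic order = the Lex order on Int × Int
  let lstS : List (Int × Int) := PySem.List.sorted lst2 (fun p => toLex p) false
  (lstS.foldl (fun (st : Int × List Int) e =>
      if e.2 = -1 then (st.1 + 1, st.2)
      else if e.2 = -2 then (st.1 - 1, st.2)
      else (st.1, PySem.List.pySetD st.2 e.2 st.1)) ((0 : Int), lst_us)).2

-- ===== PORT B =====
def find_kol_alt (s : Int) (k : Int) (lst_int : List (Int × Int)) (lst_us : List Int) : List Int :=
  let starts : List Int :=
    PySem.List.sorted ((PySem.List.pyRange 0 s 1).map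
      (fun i => (PySem.List.pyGetD lst_int i ((0:Int),(0:Int))).1)) (fun x => x) false
  let ends : List Int :=
    PySem.List.sorted ((PySem.List.pyRange 0 s 1).map
      (fun i => (PySem.List.pyGetD lst_int i ((0:Int),(0:Int))).2)) (fun x => x) false
  (PySem.List.pyRange 0 k 1).foldl (fun res j =>
      let x := PySem.List.pyGetD lst_us j 0
      PySem.List.pySetD res j
        ((PySem.List.bisectRight starts x : Int) - (PySem.List.bisectRight ends x : Int))) lst_us

-- ===== PRECONDITION & SPEC =====
-- Pre_ = exactly where the Python A returns: it indexes lst_int[i] for i in range(s) and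
-- lst_us[i] for i in range(k), raising IndexError iff s > len(lst_int) or k > len(lst_us).
def Pre_find_kol (s : Int) (k : Int) (lst_int : List (Int × Int)) (lst_us : List Int) : Prop :=
  s ≤ (lst_int.length : Int) ∧ k ≤ (lst_us.length : Int)
instance (s : Int) (k : Int) (lst_int : List (Int × Int)) (lst_us : List Int) : Decidable (Pre_find_kol s k lst_int lst_us) := by unfold Pre_find_kol; infer_instance
def pvWitness_find_kol : Int × Int × (List (Int × Int)) × List Int := (2, 2, [(1, 3), (2, 5)], [2, 3])
def Spec_find_kol (s : Int) (k : Int) (lst_int : List (Int × Int)) (lst_us : List Int) (out : List Int) : Prop := out = find_kol_alt s k lst_int lst_us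
instance (s : Int) (k : Int) (lst_int : List (Int × Int)) (lst_us : List Int) (out : List Int) : Decidable (Spec_find_kol s k lst_int lst_us out) := by unfold Spec_find_kol; infer_instance

-- ===== CLAIM (what is proved, stated in full; the proofs are below) =====
def Claim_equal_find_kol : Prop := ∀ (s : Int) (k : Int) (lst_int : List (Int × Int)) (lst_us : List Int), Dom_find_kol s k lst_int lst_us → Pre_find_kol s k lst_int lst_us → Spec_find_kol s k lst_int lst_us (find_kol s k lst_int lst_us)

-- ===== LEMMAS AND PROOFS =====

-- A's sweep step on state (cnt, lst_us_copy)
def pvStep (st : Int × List Int) (e : Int × Int) : Int × List Int :=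
  if e.2 = -1 then (st.1 + 1, st.2)
  else if e.2 = -2 then (st.1 - 1, st.2)
  else (st.1, PySem.List.pySetD st.2 e.2 st.1)

-- the start/end events of the first s intervals, and the query events of the first k points
def pvEvents (s : Int) (lst_int : List (Int × Int)) : List (Int × Int) :=
  (PySem.List.pyRange 0 s 1).flatMap (fun i =>
    [((PySem.List.pyGetD lst_int i ((0:Int),(0:Int))).1, (-1 : Int)),
     ((PySem.List.pyGetD lst_int i ((0:Int),(0:Int))).2, (-2 : Int))])
def pvQueries (k : Int) (lst_us : List Int) : List (Int × Int) :=
  (PySem.List.pyRange 0 k 1).map (fun i => (PySem.List.pyGetD lst_us i 0, i))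

lemma find_kol_eq (s k : Int) (li : List (Int × Int)) (lu : List Int) :
    find_kol s k li lu =
      ((PySem.List.sorted (pvEvents s li ++ pvQueries k lu) (fun p => toLex p) false).foldl
        pvStep ((0 : Int), lu)).2 := by
  unfold find_kol pvEvents pvQueries pvStep
  simp only [PySem.List.foldl_append_eq_flatMap, List.nil_append]
  rw [show List.flatMap (fun x => [(PySem.List.pyGetD lu x 0, x)]) (PySem.List.pyRange 0 k 1)
        = List.map (fun i => (PySem.List.pyGetD lu i 0, i)) (PySem.List.pyRange 0 k 1) from by
      induction PySem.List.pyRange 0 k 1 with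
      | nil => rfl
      | cons a t ih => simp [List.flatMap_cons, ih]]

-- === basic sweep lemmas ===
lemma pvStep_len : ∀ (l : List (Int × Int)) (c : Int) (r : List Int),
    ((l.foldl pvStep (c, r)).2).length = r.length := by
  intro l
  induction l with
  | nil => intro c r; rfl
  | cons a t ih =>
    intro c r
    simp only [List.foldl_cons, pvStep]
    split_ifs with h1 h2
    · exact ih _ _
    · exact ih _ _
    · rw [ih _ _]; simp [PySem.List.length_pySetD]

lemma pvStep_fst : ∀ (l : List (Int × Int)) (c : Int) (r : List Int),
    (l.foldl pvStep (c, r)).1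
      = c + ((l.countP (fun e => e.2 == -1) : Int) - (l.countP (fun e => e.2 == -2) : Int)) := by
  intro l
  induction l with
  | nil => intro c r; simp
  | cons a t ih =>
    intro c r
    simp only [List.foldl_cons, pvStep]
    split_ifs with h1 h2
    · rw [ih]; simp [List.countP_cons, h1]; omega
    · rw [ih]; simp [h1, h2]; omega
    · rw [ih]; simp [h1, h2]

lemma pvStep_get_notag : ∀ (l : List (Int × Int)) (j : Nat) (c : Int) (r : List Int),
    (∀ e ∈ l, e.2 = -1 ∨ e.2 = -2 ∨ (0 ≤ e.2 ∧ e.2 ≠ (j : Int))) →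
    ((l.foldl pvStep (c, r)).2)[j]? = r[j]? := by
  intro l
  induction l with
  | nil => intro j c r _; rfl
  | cons a t ih =>
    intro j c r h
    simp only [List.foldl_cons, pvStep]
    split_ifs with h1 h2
    · exact ih j _ r (fun e he => h e (List.mem_cons_of_mem _ he))
    · exact ih j _ r (fun e he => h e (List.mem_cons_of_mem _ he))
    · rcases h a (List.mem_cons_self) with h3 | h3 | h3
      · exact absurd h3 h1
      · exact absurd h3 h2
      · rw [ih j _ _ (fun e he => h e (List.mem_cons_of_mem _ he)),
          PySem.List.pySetD_of_nonneg (h := h3.1), List.getElem?_set_ne]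
        omega

-- === classification and counting of event tags ===
lemma mem_pvEvents (s : Int) (li : List (Int × Int)) (e : Int × Int) (he : e ∈ pvEvents s li) :
    e.2 = -1 ∨ e.2 = -2 := by
  simp only [pvEvents, List.mem_flatMap] at he
  obtain ⟨i, -, he⟩ := he
  simp only [List.mem_cons, List.not_mem_nil, or_false] at he
  rcases he with rfl | rfl
  · left; rfl
  · right; rfl

lemma mem_pvQueries (k : Int) (lu : List Int) (e : Int × Int) (he : e ∈ pvQueries k lu) :
    0 ≤ e.2 ∧ e.2 < k ∧ e = (PySem.List.pyGetD lu e.2 0, e.2) := by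
  simp only [pvQueries, List.mem_map] at he
  obtain ⟨i, hi, rfl⟩ := he
  rw [PySem.List.mem_pyRange_one] at hi
  exact ⟨hi.1, hi.2, rfl⟩

lemma countP_tag (s k : Int) (li : List (Int × Int)) (lu : List Int) (j : Int)
    (h0 : 0 ≤ j) (hk : j < k) :
    (pvEvents s li ++ pvQueries k lu).countP (fun e => e.2 == j) = 1 := by
  rw [List.countP_append]
  have h1 : (pvEvents s li).countP (fun e => e.2 == j) = 0 := by
    rw [List.countP_eq_zero]
    intro e he
    rcases mem_pvEvents s li e he with h | h <;> simp [h] <;> omega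
  have h2 : (pvQueries k lu).countP (fun e => e.2 == j) = 1 := by
    unfold pvQueries
    rw [List.countP_map]
    have : ((fun (e : Int × Int) => e.2 == j) ∘ fun i => (PySem.List.pyGetD lu i 0, i))
        = fun i => i == j := rfl
    rw [this]
    rw [show (List.countP (fun i => i == j) (PySem.List.pyRange 0 k 1)) =
        List.count j (PySem.List.pyRange 0 k 1) from rfl]
    exact List.count_eq_one_of_mem (PySem.List.nodup_pyRange_one 0 k)
      (PySem.List.mem_pyRange_one.mpr ⟨h0, hk⟩)
  omega

lemma tag_unique (s k : Int) (li : List (Int × Int)) (lu : List Int) (j : Int)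
    (e : Int × Int) (he : e ∈ pvEvents s li ++ pvQueries k lu) (h0 : 0 ≤ j) (hj : e.2 = j) :
    e = (PySem.List.pyGetD lu j 0, j) := by
  rcases List.mem_append.mp he with h | h
  · rcases mem_pvEvents s li e h with h' | h' <;> omega
  · obtain ⟨-, -, h3⟩ := mem_pvQueries k lu e h
    rw [hj] at h3; exact h3

-- === generic split at the unique element satisfying p ===
lemma split_of_countP_one {α : Type} (l : List α) (p : α → Bool) (h : l.countP p = 1) :
    ∃ l1 a l2, l = l1 ++ a :: l2 ∧ p a = true ∧ l1.countP p = 0 ∧ l2.countP p = 0 := by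
  have hpos : 0 < l.countP p := by omega
  obtain ⟨a, ha, hpa⟩ := List.countP_pos_iff.mp hpos
  obtain ⟨l1, l2, rfl⟩ := List.append_of_mem ha
  rw [List.countP_append, List.countP_cons, hpa] at h
  simp at h
  exact ⟨l1, a, l2, rfl, hpa, by omega, by omega⟩

lemma countP_flatMap_pair {α : Type} (l : List α) (u v : α → Int × Int) (p : Int × Int → Bool) :
    (l.flatMap (fun i => [u i, v i])).countP p
      = l.countP (fun i => p (u i)) + l.countP (fun i => p (v i)) := by
  induction l with
  | nil => rfl
  | cons a t ih =>
    simp only [List.flatMap_cons, List.countP_append, List.countP_cons, ih, List.countP_nil]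
    omega

lemma find_kol_get_noquery (s k : Int) (li : List (Int × Int)) (lu : List Int) (j : Nat)
    (hj : k ≤ (j : Int)) : (find_kol s k li lu)[j]? = lu[j]? := by
  rw [find_kol_eq]
  apply pvStep_get_notag
  intro e he
  have he' : e ∈ pvEvents s li ++ pvQueries k lu :=
    (PySem.List.sorted_perm _ _ _).mem_iff.mp he
  rcases List.mem_append.mp he' with h | h
  · rcases mem_pvEvents s li e h with h' | h' <;> simp [h']
  · obtain ⟨h0, h1, -⟩ := mem_pvQueries k lu e h
    right; right; exact ⟨h0, by omega⟩

lemma find_kol_get_query (s k : Int) (li : List (Int × Int)) (lu : List Int) (j : Nat)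
    (hj : (j : Int) < k) (hn : j < lu.length) :
    (find_kol s k li lu)[j]? = some
      ((((PySem.List.pyRange 0 s 1).map (fun i => (PySem.List.pyGetD li i ((0:Int),(0:Int))).1)).countP
          (fun a => decide (a ≤ PySem.List.pyGetD lu (j : Int) 0)) : Int)
        - (((PySem.List.pyRange 0 s 1).map (fun i => (PySem.List.pyGetD li i ((0:Int),(0:Int))).2)).countP
          (fun a => decide (a ≤ PySem.List.pyGetD lu (j : Int) 0)) : Int)) := by
  have h0j : (0 : Int) ≤ (j : Int) := Int.natCast_nonneg j
  set x := PySem.List.pyGetD lu (j : Int) 0 with hx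
  set w : Int × Int := (x, (j : Int)) with hw
  set ev := pvEvents s li ++ pvQueries k lu with hev
  set L := PySem.List.sorted ev (fun p => toLex p) false with hL
  have hperm : L.Perm ev := PySem.List.sorted_perm _ _ _
  have hcount : L.countP (fun e => e.2 == (j : Int)) = 1 := by
    rw [hperm.countP_eq]; exact countP_tag s k li lu (j : Int) h0j hj
  obtain ⟨L1, a, L2, hsplit, hpa, h1, h2⟩ := split_of_countP_one L _ hcount
  have haw : a = w := by
    have : a ∈ ev := hperm.mem_iff.mp (hsplit ▸ List.mem_append_right _ (List.mem_cons_self))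
    exact tag_unique s k li lu (j : Int) a this h0j (by simp at hpa; exact hpa)
  subst haw
  -- order facts
  have hpw := PySem.List.sorted_pairwise ev (fun p => toLex p)
  rw [← hL, hsplit, List.pairwise_append] at hpw
  have hL1w : ∀ e ∈ L1, toLex e ≤ toLex w := fun e he => hpw.2.2 e he w (List.mem_cons_self)
  have hwL2 : ∀ e ∈ L2, toLex w ≤ toLex e := (List.pairwise_cons.mp hpw.2.1).1
  -- L1 is the strictly-smaller part
  have hL1f : L1 = L.filter (fun e => decide (toLex e < toLex w)) := by
    rw [hsplit, List.filter_append, List.filter_cons]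
    have hww : ¬ (toLex w < toLex w) := lt_irrefl _
    rw [if_neg (by simpa using hww)]
    have hf2 : L2.filter (fun e => decide (toLex e < toLex w)) = [] :=
      List.filter_eq_nil_iff.mpr (fun e he => by simpa using not_lt.mpr (hwL2 e he))
    have hf1 : L1.filter (fun e => decide (toLex e < toLex w)) = L1 :=
      List.filter_eq_self.mpr (fun e he => by
        have hne : e ≠ w := by
          intro hew
          have := List.countP_eq_zero.mp h1 e he
          simp [hew, hw] at this
        have : toLex e ≠ toLex w := fun hc => hne (by simpa using congrArg ofLex hc)
        simpa using lt_of_le_of_ne (hL1w e he) this)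
    rw [hf1, hf2, List.append_nil]
  -- counts in L1
  have hcnt : ∀ p : Int × Int → Bool,
      L1.countP p = ev.countP (fun e => p e && decide (toLex e < toLex w)) := by
    intro p
    rw [hL1f, List.countP_filter, hperm.countP_eq]
  -- the sweep
  rw [find_kol_eq, ← hev, ← hL, hsplit, List.foldl_append, List.foldl_cons]
  have hwstep : pvStep (List.foldl pvStep (0, lu) L1) w
      = ((List.foldl pvStep (0, lu) L1).1,
         PySem.List.pySetD (List.foldl pvStep (0, lu) L1).2 (j : Int)
           (List.foldl pvStep (0, lu) L1).1) := by
    unfold pvStep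
    rw [if_neg (by simp [hw]), if_neg (by simp [hw])]
  rw [hwstep, pvStep_get_notag L2 j _ _ (by
    intro e he
    have : e ∈ ev := hperm.mem_iff.mp (hsplit ▸ List.mem_append_right _ (List.mem_cons_of_mem _ he))
    have hne : e.2 ≠ (j : Int) := by
      have := List.countP_eq_zero.mp h2 e he
      simpa using this
    rcases List.mem_append.mp this with h | h
    · rcases mem_pvEvents s li e h with h' | h' <;> simp [h']
    · exact Or.inr (Or.inr ⟨(mem_pvQueries k lu e h).1, hne⟩))]
  rw [PySem.List.pySetD_of_nonneg (h := h0j)]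
  have hlen : (List.foldl pvStep (0, lu) L1).2.length = lu.length := pvStep_len L1 0 lu
  rw [show ((j:Int)).toNat = j from Int.toNat_natCast j,
      List.getElem?_set_self (by omega)]
  congr 1
  -- the running count when w is reached
  rw [show (List.foldl pvStep (0, lu) L1).1
        = 0 + ((L1.countP (fun e => e.2 == -1) : Int) - (L1.countP (fun e => e.2 == -2) : Int))
      from pvStep_fst L1 0 lu]
  rw [hcnt, hcnt]
  -- now compute the two counts over ev
  have hq1 : ∀ c : Int, c < 0 →
      (pvQueries k lu).countP (fun e => e.2 == c && decide (toLex e < toLex w)) = 0 := by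
    intro c hc
    rw [List.countP_eq_zero]
    intro e he
    obtain ⟨h0, -, -⟩ := mem_pvQueries k lu e he
    simp only [Bool.and_eq_true, beq_iff_eq]
    rintro ⟨h', -⟩
    rw [h'] at h0
    omega
  have hlex : ∀ (y c : Int), c < 0 → (toLex (y, c) < toLex w ↔ y ≤ x) := by
    intro y c hc
    rw [hw, Prod.Lex.lt_iff]
    simp only [ofLex_toLex]
    omega
  have hstart : (pvEvents s li).countP (fun e => e.2 == (-1 : Int) && decide (toLex e < toLex w))
      = ((PySem.List.pyRange 0 s 1).map (fun i => (PySem.List.pyGetD li i ((0:Int),(0:Int))).1)).countP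
          (fun a => decide (a ≤ x)) := by
    unfold pvEvents
    rw [countP_flatMap_pair, List.countP_map]
    have hz : (PySem.List.pyRange 0 s 1).countP
        (fun i => (((PySem.List.pyGetD li i ((0:Int),(0:Int))).2, (-2:Int)).2 == (-1 : Int)
          && decide (toLex ((PySem.List.pyGetD li i ((0:Int),(0:Int))).2, (-2:Int)) < toLex w))) = 0 := by
      rw [List.countP_eq_zero]; intro i _; simp
    rw [hz, Nat.add_zero]
    apply List.countP_congr
    intro i _
    simp only [Function.comp, Bool.and_eq_true, beq_iff_eq, decide_eq_true_eq]
    rw [hlex _ _ (by omega)]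
    simp
  have hend : (pvEvents s li).countP (fun e => e.2 == (-2 : Int) && decide (toLex e < toLex w))
      = ((PySem.List.pyRange 0 s 1).map (fun i => (PySem.List.pyGetD li i ((0:Int),(0:Int))).2)).countP
          (fun a => decide (a ≤ x)) := by
    unfold pvEvents
    rw [countP_flatMap_pair, List.countP_map]
    have hz : (PySem.List.pyRange 0 s 1).countP
        (fun i => (((PySem.List.pyGetD li i ((0:Int),(0:Int))).1, (-1:Int)).2 == (-2 : Int)
          && decide (toLex ((PySem.List.pyGetD li i ((0:Int),(0:Int))).1, (-1:Int)) < toLex w))) = 0 := by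
      rw [List.countP_eq_zero]; intro i _; simp
    rw [hz, Nat.zero_add]
    apply List.countP_congr
    intro i _
    simp only [Function.comp, Bool.and_eq_true, beq_iff_eq, decide_eq_true_eq]
    rw [hlex _ _ (by omega)]
    simp
  rw [hev, List.countP_append, List.countP_append, hq1 (-1) (by omega), hq1 (-2) (by omega),
    hstart, hend]
  omega

lemma setfold_get (F : Int → Int) : ∀ (ran : List Int) (r : List Int) (j : Nat),
    (∀ i ∈ ran, 0 ≤ i) →
    (ran.foldl (fun res i => PySem.List.pySetD res i (F i)) r)[j]?
      = if (j : Int) ∈ ran ∧ j < r.length then some (F (j : Int)) else r[j]? := by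
  intro ran
  induction ran with
  | nil => intro r j _; simp
  | cons a t ih =>
    intro r j h
    have ha : 0 ≤ a := h a List.mem_cons_self
    rw [List.foldl_cons, ih _ _ (fun i hi => h i (List.mem_cons_of_mem _ hi)),
      PySem.List.length_pySetD, PySem.List.pySetD_of_nonneg (h := ha)]
    by_cases h1 : (j : Int) ∈ t ∧ j < r.length
    · rw [if_pos h1, if_pos ⟨List.mem_cons_of_mem _ h1.1, h1.2⟩]
    · rw [if_neg h1]
      by_cases h2 : a.toNat = j
      · have haj : a = (j : Int) := by omega
        by_cases h3 : j < r.length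
        · rw [h2, List.getElem?_set_self h3,
            if_pos ⟨by rw [haj] at *; exact List.mem_cons_self, h3⟩, haj]
        · rw [List.getElem?_eq_none (by simpa using by omega),
            List.getElem?_eq_none (by omega), if_neg (by rintro ⟨-, h4⟩; omega)]
      · rw [List.getElem?_set_ne (by omega), if_neg (by
          rintro ⟨hm, hlen⟩
          rcases List.mem_cons.mp hm with h4 | h4
          · omega
          · exact h1 ⟨h4, hlen⟩)]

lemma bisect_count (xs : List Int) (x : Int) :
    PySem.List.bisectRight (PySem.List.sorted xs (fun y => y) false) x
      = xs.countP (fun y => decide (y ≤ x)) := by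
  set l := PySem.List.sorted xs (fun y => y) false with hl
  have hp : l.Pairwise (fun a b => a ≤ b) := PySem.List.sorted_pairwise xs (fun y => y)
  obtain ⟨hle, hlt, hgt⟩ := PySem.List.bisectRight_spec l x hp
  set r := PySem.List.bisectRight l x with hr
  have hperm : l.Perm xs := PySem.List.sorted_perm xs (fun y => y) false
  rw [← hperm.countP_eq]
  conv_rhs => rw [← List.take_append_drop r l]
  rw [List.countP_append]
  have h1 : (l.take r).countP (fun y => decide (y ≤ x)) = r := by
    have : (l.take r).countP (fun y => decide (y ≤ x)) = (l.take r).length := by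
      rw [List.countP_eq_length]
      intro a hamem
      obtain ⟨i, hi, rfl⟩ := List.mem_iff_getElem.mp hamem
      have hi' : i < l.length := by
        have := List.length_take (l := l) (i := r); omega
      rw [List.getElem_take]
      simpa using hlt i hi' (by have := List.length_take (l := l) (i := r); omega)
    rw [this, List.length_take]; omega
  have h2 : (l.drop r).countP (fun y => decide (y ≤ x)) = 0 := by
    rw [List.countP_eq_zero]
    intro a hamem
    obtain ⟨i, hi, rfl⟩ := List.mem_iff_getElem.mp hamem
    rw [List.getElem_drop]
    have hi' : r + i < l.length := by
      have := List.length_drop (l := l) (i := r); omega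
    simpa using not_le.mpr (hgt (r + i) hi' (by omega))
  omega

lemma alt_get (s k : Int) (li : List (Int × Int)) (lu : List Int) (j : Nat) :
    (find_kol_alt s k li lu)[j]?
      = if (j : Int) ∈ PySem.List.pyRange 0 k 1 ∧ j < lu.length then
          some ((PySem.List.bisectRight
              (PySem.List.sorted ((PySem.List.pyRange 0 s 1).map
                (fun i => (PySem.List.pyGetD li i ((0:Int),(0:Int))).1)) (fun y => y) false)
              (PySem.List.pyGetD lu (j : Int) 0) : Int)
            - (PySem.List.bisectRight
              (PySem.List.sorted ((PySem.List.pyRange 0 s 1).map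
                (fun i => (PySem.List.pyGetD li i ((0:Int),(0:Int))).2)) (fun y => y) false)
              (PySem.List.pyGetD lu (j : Int) 0) : Int))
        else lu[j]? := by
  exact setfold_get _ (PySem.List.pyRange 0 k 1) lu j
    (fun i hi => (PySem.List.mem_pyRange_one.mp hi).1)

theorem find_kol_main (s k : Int) (li : List (Int × Int)) (lu : List Int)
    (hk : k ≤ (lu.length : Int)) : find_kol s k li lu = find_kol_alt s k li lu := by
  apply List.ext_getElem?
  intro j
  rw [alt_get]
  by_cases hjk : (j : Int) < k
  · have hjn : j < lu.length := by omega
    rw [find_kol_get_query s k li lu j hjk hjn,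
      if_pos ⟨PySem.List.mem_pyRange_one.mpr ⟨by omega, hjk⟩, hjn⟩,
      bisect_count, bisect_count]
  · rw [find_kol_get_noquery s k li lu j (by omega),
      if_neg (by rintro ⟨hm, -⟩; exact hjk (PySem.List.mem_pyRange_one.mp hm).2)]

-- ===== VERDICT (by name: the statement is the Claim_ definition above) =====
theorem find_kol_spec : Claim_equal_find_kol := by
  intro s k li lu _ hpre
  unfold Spec_find_kol
  exact find_kol_main s k li lu hpre.2
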